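-- pv_equiv track=rewrite | github.com/chenyx512/battlecode24 | src/bot1/gen_bfs.py | gen_init
-- ===== SOURCE A (Python) =====
-- def encode(x, y):
--     return (x+7) + 15*(y+7)
--
-- DIRECTIONS = {
--     (1, 0): 'EAST',
--     (-1, 0): 'WEST',
--     (0, 1): 'NORTH',
--     (0, -1): 'SOUTH',
--     (1, 1): 'NORTHEAST',
--     (-1, 1): 'NORTHWEST',
--     (1, -1): 'SOUTHEAST',
--     (-1, -1): 'SOUTHWEST',
-- }
--
-- def dist(x, y):
--     return x*x + y*y
--
-- def sign(x):
--     if x > 0: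
--         return 1
--     if x < 0:
--         return -1
--     return 0
--
-- def gen_init(radius):
--     out = f"""
--         l{encode(0,0)} = rc.getLocation();
--         d{encode(0,0)} = 0;
--         // dir{encode(0,0)} = CENTER;
-- """
--     for r2 in range(1, radius+1):
--         for x in range(-7, 8):
--             for y in range(-7, 8):
--                 if dist(x, y) == r2:
--                     out += f"""
--         l{encode(x,y)} = l{encode(x - sign(x), y - sign(y))}.add({DIRECTIONS[(sign(x), sign(y))]}); // ({x}, {y}) from ({x - sign(x)}, {y - sign(y)})
--         d{encode(x,y)} = 99999;
--         // dir{encode(x,y)} = null;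
-- """
--     return out
-- ===== SOURCE B (Python) =====
-- CELL_TMPL = """
--         l{a} = l{p}.add({dir}); // ({x}, {y}) from ({px}, {py})
--         d{a} = 99999;
--         // dir{a} = null;
-- """
--
-- HEADER = """
--         l112 = rc.getLocation();
--         d112 = 0;
--         // dir112 = CENTER;
-- """
--
-- NAMES = ["SOUTHWEST", "WEST", "NORTHWEST", "SOUTH", "", "NORTH",
--          "SOUTHEAST", "EAST", "NORTHEAST"]
--
-- def gen_init(radius):
--     cells = []
--     for x in range(-7, 8):
--         for y in range(-7, 8):
--             if x or y:
--                 cells.append((x*x + y*y, x, y))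
--     cells.sort(key=lambda c: c[0])  # stable: keeps (x, y) scan order within a distance
--     out = HEADER
--     for d, x, y in cells:
--         if d > radius:
--             break
--         sx = (x > 0) - (x < 0)
--         sy = (y > 0) - (y < 0)
--         px, py = x - sx, y - sy
--         out += CELL_TMPL.format(a=(x+7) + 15*(y+7), p=(px+7) + 15*(py+7),
--                                 dir=NAMES[(sx+1)*3 + (sy+1)],
--                                 x=x, y=y, px=px, py=py)
--     return out
-- ===== Notes on version B (the rewrite author's own statement) =====
-- stated objective: faster
-- what changed: B replaces A's rescan of the whole 15x15 grid for every r2 in 1..radius by one pass that collects (dist,x,y) triples, one stable sort by distance, and a single emission loop that breaks as soon as the distance exceeds radius; the Java text is produced from one placeholder template instead of A's inline f-strings.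
import Mathlib
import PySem

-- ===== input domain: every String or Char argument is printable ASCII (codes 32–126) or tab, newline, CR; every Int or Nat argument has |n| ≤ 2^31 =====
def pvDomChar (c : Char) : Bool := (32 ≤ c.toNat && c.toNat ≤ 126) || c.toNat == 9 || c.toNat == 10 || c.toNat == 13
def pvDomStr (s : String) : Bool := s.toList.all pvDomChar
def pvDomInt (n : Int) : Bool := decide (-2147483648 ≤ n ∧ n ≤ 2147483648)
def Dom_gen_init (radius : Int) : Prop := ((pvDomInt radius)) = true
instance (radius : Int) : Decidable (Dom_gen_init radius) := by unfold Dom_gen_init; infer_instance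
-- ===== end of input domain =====

set_option maxRecDepth 16384
set_option maxHeartbeats 1000000


-- B collects the 224 non-centre cells as (dist,x,y) triples in one pass, stable-sorts them by
-- distance once, and emits them in a single loop that breaks once dist > radius (faster for
-- large radius than A's full-grid rescan per r2); text comes from one placeholder template.

-- ===== PORT A =====
-- module helpers used by A (encode, DIRECTIONS, dist, sign and A's inline f-strings);
-- strings are built at the List Char level (each piece a literal or str(int) = PySem.Int.toChars)
def pvEncode (x y : Int) : Int := (x+7) + 15*(y+7)

def pvDirections : PySem.Dict (Int × Int) String :=
  PySem.Dict.ofList [((1,0),"EAST"), ((-1,0),"WEST"), ((0,1),"NORTH"), ((0,-1),"SOUTH"),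
    ((1,1),"NORTHEAST"), ((-1,1),"NORTHWEST"), ((1,-1),"SOUTHEAST"), ((-1,-1),"SOUTHWEST")]

def pvDist (x y : Int) : Int := x*x + y*y

def pvSign (x : Int) : Int := if x > 0 then 1 else if x < 0 then -1 else 0

-- A's per-cell f-string; the DIRECTIONS lookup cannot raise KeyError on any executed cell
-- (A only reaches it for cells with x*x+y*y = r2 ≥ 1, so (sign x, sign y) ≠ (0,0))
def pvBlock (x y : Int) : List Char :=
  "\n        l".toList ++ PySem.Int.toChars (pvEncode x y)
  ++ " = l".toList ++ PySem.Int.toChars (pvEncode (x - pvSign x) (y - pvSign y))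
  ++ ".add(".toList ++ (PySem.Dict.getD pvDirections (pvSign x, pvSign y) "").toList
  ++ "); // (".toList ++ PySem.Int.toChars x ++ ", ".toList ++ PySem.Int.toChars y
  ++ ") from (".toList ++ PySem.Int.toChars (x - pvSign x) ++ ", ".toList ++ PySem.Int.toChars (y - pvSign y)
  ++ ")\n        d".toList ++ PySem.Int.toChars (pvEncode x y)
  ++ " = 99999;\n        // dir".toList ++ PySem.Int.toChars (pvEncode x y)
  ++ " = null;\n".toList

def pvHeaderA : List Char :=
  "\n        l".toList ++ PySem.Int.toChars (pvEncode 0 0)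
  ++ " = rc.getLocation();\n        d".toList ++ PySem.Int.toChars (pvEncode 0 0)
  ++ " = 0;\n        // dir".toList ++ PySem.Int.toChars (pvEncode 0 0)
  ++ " = CENTER;\n".toList

def gen_init (radius : Int) : String :=
  String.ofList ((PySem.List.pyRange 1 (radius+1) 1).foldl (fun out r2 =>
    (PySem.List.pyRange (-7) 8 1).foldl (fun out x =>
      (PySem.List.pyRange (-7) 8 1).foldl (fun out y =>
        if pvDist x y == r2 then out ++ pvBlock x y else out) out) out) pvHeaderA)

-- ===== PORT B =====
-- B's placeholder template and header (plain string literals in Source B)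
def pvTmpl : List Char :=
  "\n        l{a} = l{p}.add({dir}); // ({x}, {y}) from ({px}, {py})\n        d{a} = 99999;\n        // dir{a} = null;\n".toList

def pvHeaderB : List Char :=
  "\n        l112 = rc.getLocation();\n        d112 = 0;\n        // dir112 = CENTER;\n".toList

def pvNames : List String :=
  ["SOUTHWEST", "WEST", "NORTHWEST", "SOUTH", "", "NORTH", "SOUTHEAST", "EAST", "NORTHEAST"]

-- keyword lookup of str.format (every placeholder of pvTmpl is bound, so the
-- KeyError branch of Python's format is unreachable; [] stands for that dead branch)
def pvEnvGet (env : List (List Char × List Char)) (k : List Char) : List Char :=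
  match env with
  | [] => []
  | (k', v) :: rest => if k' = k then v else pvEnvGet rest k

-- str.format ported in two stages: split the template into literal chunks and '{name}'
-- placeholders, then substitute (exact for pvTmpl: it has no escaped braces and no format
-- specs; the Nat fuel, always called as t.length, only bounds the scan — each step
-- consumes at least one character)
def pvTokenize (fuel : Nat) (t : List Char) : List (Bool × List Char) :=
  match fuel, t with
  | 0, _ => []
  | _, [] => []
  | f+1, '{' :: rest =>
      (false, rest.takeWhile (· ≠ '}')) :: pvTokenize f ((rest.dropWhile (· ≠ '}')).drop 1)
  | f+1, c :: rest =>
      match pvTokenize f rest with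
      | (true, l) :: ts => (true, c :: l) :: ts
      | ts => (true, [c]) :: ts

def pvFmt (t : List Char) (env : List (List Char × List Char)) : List Char :=
  (pvTokenize t.length t).flatMap (fun tok => if tok.1 then tok.2 else pvEnvGet env tok.2)

-- one formatted cell (sx,sy computed as (x>0)-(x<0); NAMES indexed by (sx+1)*3+(sy+1),
-- always in range 0..8, so the IndexError branch of pyGet? is unreachable)
def pvCellB (x y : Int) : List Char :=
  let sx : Int := (if x > 0 then 1 else 0) - (if x < 0 then 1 else 0)
  let sy : Int := (if y > 0 then 1 else 0) - (if y < 0 then 1 else 0)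
  let px := x - sx
  let py := y - sy
  pvFmt pvTmpl
    [("a".toList, PySem.Int.toChars ((x+7) + 15*(y+7))),
     ("p".toList, PySem.Int.toChars ((px+7) + 15*(py+7))),
     ("dir".toList, ((PySem.List.pyGet? pvNames ((sx+1)*3 + (sy+1))).getD "").toList),
     ("x".toList, PySem.Int.toChars x),
     ("y".toList, PySem.Int.toChars y),
     ("px".toList, PySem.Int.toChars px),
     ("py".toList, PySem.Int.toChars py)]

def pvCellsB : List (Int × Int × Int) :=
  (PySem.List.pyRange (-7) 8 1).foldl (fun cs x =>
    (PySem.List.pyRange (-7) 8 1).foldl (fun cs y =>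
      if x != 0 || y != 0 then cs ++ [(x*x + y*y, x, y)] else cs) cs) []

-- the emission loop with its break
def pvLoopB : List (Int × Int × Int) → Int → List Char → List Char
  | [], _, out => out
  | (d, x, y) :: rest, radius, out =>
      if d > radius then out else pvLoopB rest radius (out ++ pvCellB x y)

def gen_init_alt (radius : Int) : String :=
  String.ofList (pvLoopB (PySem.List.sorted pvCellsB (fun c => c.1) false) radius pvHeaderB)

-- ===== PRECONDITION & SPEC =====
def Spec_gen_init (radius : Int) (out : String) : Prop := out = gen_init_alt radius
instance (radius : Int) (out : String) : Decidable (Spec_gen_init radius out) := by unfold Spec_gen_init; infer_instance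

-- ===== CLAIM (what is proved, stated in full; the proofs are below) =====
def Claim_equal_gen_init : Prop := ∀ (radius : Int), Dom_gen_init radius → Spec_gen_init radius (gen_init radius)

-- ===== LEMMAS AND PROOFS =====

def pvXs : List Int := PySem.List.pyRange (-7) 8 1
def pvCells : List (Int × Int) := pvXs.flatMap (fun x => pvXs.map (fun y => (x, y)))
def pvCellsAt (r2 : Int) : List (Int × Int) := pvCells.filter (fun c => pvDist c.1 c.2 == r2)
def pvG (r2 : Int) : List Char :=
  pvXs.flatMap (fun x => pvXs.flatMap (fun y => if pvDist x y == r2 then pvBlock x y else []))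
def pvEmit (d : Int) : List Char := (pvCellsAt d).flatMap (fun c => pvBlock c.1 c.2)
def pvGroup (d : Int) : List (Int × Int × Int) := pvCellsB.filter (fun c => c.1 == d)
def pvK : List Int := [1, 2, 4, 5, 8, 9, 10, 13, 16, 17, 18, 20, 25, 26, 29, 32, 34, 36, 37, 40, 41, 45, 49, 50, 52, 53, 58, 61, 65, 72, 74, 85, 98]

theorem pv_foldl_ite {α β : Type} (l : List α) (p : α → Prop) [DecidablePred p]
    (f : α → List β) (s : List β) :
    l.foldl (fun acc a => if p a then acc ++ f a else acc) s
      = s ++ l.flatMap (fun a => if p a then f a else []) := by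
  induction l generalizing s with
  | nil => simp
  | cons a t ih => by_cases h : p a <;> simp [h, ih]

theorem pv_flatMap_ite {α β : Type} (l : List α) (p : α → Prop) [DecidablePred p]
    (f : α → List β) :
    l.flatMap (fun a => if p a then f a else []) = (l.filter (fun a => decide (p a))).flatMap f := by
  induction l with
  | nil => simp
  | cons a t ih => by_cases h : p a <;> simp [h, ih]

theorem pv_flatMap_if {α β : Type} (l : List α) (p : α → Bool) (f : α → List β) :
    l.flatMap (fun a => if p a then f a else []) = (l.filter p).flatMap f := by
  induction l with
  | nil => simp
  | cons a t ih => by_cases h : p a <;> simp [h, ih]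

theorem pv_filter_flatMap {α β : Type} (l : List α) (g : α → List β) (p : β → Bool) :
    (l.flatMap g).filter p = l.flatMap (fun a => (g a).filter p) := by
  induction l with
  | nil => simp
  | cons a t ih => simp [ih]

theorem pv_A_chars (radius : Int) :
    gen_init radius = String.ofList (pvHeaderA ++ (PySem.List.pyRange 1 (radius+1) 1).flatMap pvG) := by
  unfold gen_init
  simp only [pv_foldl_ite, PySem.List.foldl_append_eq_flatMap]
  rfl

theorem pv_G_eq (r2 : Int) : pvG r2 = (pvCellsAt r2).flatMap (fun c => pvBlock c.1 c.2) := by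
  unfold pvG pvCellsAt pvCells
  rw [pv_filter_flatMap, List.flatMap_assoc]
  apply List.flatMap_congr
  intro x _
  rw [List.filter_map, List.flatMap_map, pv_flatMap_if]
  rfl

theorem pv_K_bounds : ∀ k ∈ pvK, 1 ≤ k ∧ k ≤ 98 := by decide

theorem pv_K_pairwise : pvK.Pairwise (· < ·) := by decide

theorem pv_K_nodup : pvK.Nodup := by decide

theorem pv_dists_in_K : ∀ c ∈ pvCells, pvDist c.1 c.2 = 0 ∨ pvK.contains (pvDist c.1 c.2) = true := by
  decide

theorem pv_cellsAt_not_in_K (d : Int) (h1 : 1 ≤ d) (hc : pvK.contains d = false) :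
    pvCellsAt d = [] := by
  unfold pvCellsAt
  rw [List.filter_eq_nil_iff]
  intro c hcc
  simp only [beq_iff_eq]
  intro hd
  rcases pv_dists_in_K c hcc with h | h
  · omega
  · rw [hd, hc] at h
    cases h

theorem pv_G_if (r2 : Int) (h1 : 1 ≤ r2) :
    pvG r2 = if pvK.contains r2 then pvEmit r2 else [] := by
  by_cases hc : pvK.contains r2 = true
  · rw [if_pos hc, pv_G_eq]; rfl
  · rw [if_neg hc, pv_G_eq, pv_cellsAt_not_in_K r2 h1 (by simpa using hc)]
    simp

theorem pv_filter_eq (n : Int) :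
    (PySem.List.pyRange 1 (n+1) 1).filter (fun r2 => pvK.contains r2)
      = pvK.filter (fun d => decide (d ≤ n)) := by
  have hmem : ∀ a : Int,
      a ∈ (PySem.List.pyRange 1 (n+1) 1).filter (fun r2 => pvK.contains r2)
        ↔ a ∈ pvK.filter (fun d => decide (d ≤ n)) := by
    intro a
    simp only [List.mem_filter, PySem.List.mem_pyRange_one, List.contains_iff_mem,
      decide_eq_true_eq]
    constructor
    · rintro ⟨⟨_, h2⟩, h3⟩; exact ⟨h3, by omega⟩
    · rintro ⟨h1, h2⟩
      have hb := pv_K_bounds a h1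
      exact ⟨⟨by omega, by omega⟩, h1⟩
  have hperm := (List.perm_ext_iff_of_nodup
    ((PySem.List.nodup_pyRange_one 1 (n+1)).filter _) (pv_K_nodup.filter _)).mpr hmem
  exact List.Perm.eq_of_pairwise (fun a b _ _ hab hba => le_antisymm hab hba)
    (((PySem.List.pairwise_lt_pyRange_one 1 (n+1)).filter _).imp le_of_lt)
    ((pv_K_pairwise.filter _).imp le_of_lt) hperm

theorem pv_A_main (n : Int) :
    (PySem.List.pyRange 1 (n+1) 1).flatMap pvG
      = (pvK.filter (fun d => decide (d ≤ n))).flatMap pvEmit := by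
  rw [List.flatMap_congr (fun r2 hr => pv_G_if r2 (PySem.List.mem_pyRange_one.mp hr).1)]
  rw [pv_flatMap_if, pv_filter_eq n]

-- ---- B side ----

theorem pv_header_eq : pvHeaderB = pvHeaderA := by decide

theorem pv_tokens : pvTokenize pvTmpl.length pvTmpl =
    [(true, "\n        l".toList), (false, "a".toList), (true, " = l".toList), (false, "p".toList),
     (true, ".add(".toList), (false, "dir".toList), (true, "); // (".toList), (false, "x".toList),
     (true, ", ".toList), (false, "y".toList), (true, ") from (".toList), (false, "px".toList),
     (true, ", ".toList), (false, "py".toList),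
     (true, ")\n        d".toList), (false, "a".toList), (true, " = 99999;\n        // dir".toList),
     (false, "a".toList), (true, " = null;\n".toList)] := by decide

theorem pvFmt_tmpl (va vp vd vx vy vpx vpy : List Char) :
    pvFmt pvTmpl
      [("a".toList, va), ("p".toList, vp), ("dir".toList, vd), ("x".toList, vx),
       ("y".toList, vy), ("px".toList, vpx), ("py".toList, vpy)]
      = "\n        l".toList ++ va ++ " = l".toList ++ vp ++ ".add(".toList ++ vd
        ++ "); // (".toList ++ vx ++ ", ".toList ++ vy ++ ") from (".toList ++ vpx
        ++ ", ".toList ++ vpy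
        ++ ")\n        d".toList ++ va ++ " = 99999;\n        // dir".toList ++ va
        ++ " = null;\n".toList := by
  unfold pvFmt
  rw [pv_tokens]
  simp only [List.flatMap_cons, List.flatMap_nil, if_true, if_false, Bool.false_eq_true,
    List.append_nil]
  have ha : pvEnvGet [("a".toList, va), ("p".toList, vp), ("dir".toList, vd), ("x".toList, vx), ("y".toList, vy), ("px".toList, vpx), ("py".toList, vpy)] "a".toList = va := rfl
  have hp : pvEnvGet [("a".toList, va), ("p".toList, vp), ("dir".toList, vd), ("x".toList, vx), ("y".toList, vy), ("px".toList, vpx), ("py".toList, vpy)] "p".toList = vp := rfl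
  have hdir : pvEnvGet [("a".toList, va), ("p".toList, vp), ("dir".toList, vd), ("x".toList, vx), ("y".toList, vy), ("px".toList, vpx), ("py".toList, vpy)] "dir".toList = vd := rfl
  have hx : pvEnvGet [("a".toList, va), ("p".toList, vp), ("dir".toList, vd), ("x".toList, vx), ("y".toList, vy), ("px".toList, vpx), ("py".toList, vpy)] "x".toList = vx := rfl
  have hy : pvEnvGet [("a".toList, va), ("p".toList, vp), ("dir".toList, vd), ("x".toList, vx), ("y".toList, vy), ("px".toList, vpx), ("py".toList, vpy)] "y".toList = vy := rfl
  have hpx : pvEnvGet [("a".toList, va), ("p".toList, vp), ("dir".toList, vd), ("x".toList, vx), ("y".toList, vy), ("px".toList, vpx), ("py".toList, vpy)] "px".toList = vpx := rfl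
  have hpy : pvEnvGet [("a".toList, va), ("p".toList, vp), ("dir".toList, vd), ("x".toList, vx), ("y".toList, vy), ("px".toList, vpx), ("py".toList, vpy)] "py".toList = vpy := rfl
  rw [ha, hp, hdir, hx, hy, hpx, hpy]
  simp [List.append_assoc]

theorem pv_sign_eq (x : Int) :
    ((if x > 0 then (1:Int) else 0) - (if x < 0 then 1 else 0)) = pvSign x := by
  unfold pvSign; split_ifs <;> omega

theorem pv_sign_cases (x : Int) : pvSign x = -1 ∨ pvSign x = 0 ∨ pvSign x = 1 := by
  unfold pvSign; split_ifs <;> simp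

theorem pv_dir_eq (sx sy : Int) (hx : sx = -1 ∨ sx = 0 ∨ sx = 1) (hy : sy = -1 ∨ sy = 0 ∨ sy = 1) :
    ((PySem.List.pyGet? pvNames ((sx+1)*3 + (sy+1))).getD "").toList
      = (PySem.Dict.getD pvDirections (sx, sy) "").toList := by
  rcases hx with h | h | h <;> rcases hy with h' | h' | h' <;> subst h <;> subst h' <;> rfl

theorem pv_cell_eq (x y : Int) : pvCellB x y = pvBlock x y := by
  unfold pvCellB pvBlock pvEncode
  simp only [pv_sign_eq]
  rw [pvFmt_tmpl, pv_dir_eq (pvSign x) (pvSign y) (pv_sign_cases x) (pv_sign_cases y)]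

theorem pv_cellsB_eq :
    pvCellsB = pvXs.flatMap (fun x => pvXs.flatMap (fun y =>
      if (x != 0 || y != 0) = true then [(x*x + y*y, x, y)] else [])) := by
  unfold pvCellsB pvXs
  simp only [pv_foldl_ite, PySem.List.foldl_append_eq_flatMap]
  rfl

theorem pv_group_pairs (d : Int) (h1 : 1 ≤ d) :
    (pvGroup d).map (fun c => (c.2.1, c.2.2)) = pvCellsAt d := by
  unfold pvGroup pvCellsAt pvCells
  rw [pv_cellsB_eq]
  simp only [pv_filter_flatMap, List.map_eq_flatMap]
  rw [List.flatMap_assoc]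
  apply List.flatMap_congr
  intro x _
  rw [List.flatMap_assoc]
  apply List.flatMap_congr
  intro y _
  by_cases hz : (x != 0 || y != 0) = true
  · rw [if_pos hz]
    by_cases hd : (x*x + y*y) = d
    · have hb : (((x*x+y*y, x, y) : Int × Int × Int).1 == d) = true := by simpa using hd
      have hb2 : (pvDist x y == d) = true := by simp [pvDist]; omega
      simp [hb, hb2]
    · have hb : (((x*x+y*y, x, y) : Int × Int × Int).1 == d) = false := by simpa using hd
      have hb2 : (pvDist x y == d) = false := by simp [pvDist]; omega
      simp [hb, hb2]
  · rw [if_neg hz]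
    have hx0 : x = 0 ∧ y = 0 := by
      by_contra hcon
      apply hz
      simp only [Bool.or_eq_true, bne_iff_ne, ne_eq]
      omega
    obtain ⟨hx0, hy0⟩ := hx0
    subst hx0; subst hy0
    have hb2 : (pvDist 0 0 == d) = false := by simp [pvDist]; omega
    simp [hb2]

theorem pv_takeWhile_eq_filter {α : Type} (key : α → Int) (r : Int) (l : List α)
    (h : l.Pairwise (fun a b => key a ≤ key b)) :
    l.takeWhile (fun c => decide (key c ≤ r)) = l.filter (fun c => decide (key c ≤ r)) := by
  induction l with
  | nil => simp
  | cons a t ih =>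
    rcases List.pairwise_cons.mp h with ⟨ha, ht⟩
    by_cases hk : key a ≤ r
    · simp [hk, ih ht]
    · have hk' : (decide (key a ≤ r)) = false := by simp [hk]
      rw [List.takeWhile_cons, List.filter_cons, hk']
      simp only [Bool.false_eq_true, if_false]
      symm
      rw [List.filter_eq_nil_iff]
      intro b hb
      have := ha b hb
      simp only [decide_eq_true_eq]
      omega

theorem pv_takeWhile_filter' (r : Int) (l : List (Int × Int × Int))
    (h : l.Pairwise (fun a b => a.1 ≤ b.1)) :
    l.takeWhile (fun c => decide (c.1 ≤ r)) = l.filter (fun c => decide (c.1 ≤ r)) :=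
  pv_takeWhile_eq_filter (fun c => c.1) r l h

theorem pv_loopB_eq (l : List (Int × Int × Int)) (r : Int) (out : List Char) :
    pvLoopB l r out
      = out ++ (l.takeWhile (fun c => decide (c.1 ≤ r))).flatMap (fun c => pvCellB c.2.1 c.2.2) := by
  induction l generalizing out with
  | nil => simp [pvLoopB]
  | cons c t ih =>
    obtain ⟨d, x, y⟩ := c
    by_cases h : d > r
    · simp [pvLoopB, h, show ¬ d ≤ r by omega]
    · simp only [pvLoopB, if_neg h, ih, List.takeWhile_cons,
        show (decide (d ≤ r)) = true by simp; omega]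
      simp

theorem pv_sortedB_eq : PySem.List.sorted pvCellsB (fun c => c.1) false = pvK.flatMap pvGroup := by
  decide

theorem pv_group_key : ∀ d : Int, ∀ c ∈ pvGroup d, c.1 = d := by
  intro d c hc
  have := (List.mem_filter.mp hc).2
  simpa using this

theorem pv_group_emit : ∀ d ∈ pvK, (pvGroup d).flatMap (fun c => pvCellB c.2.1 c.2.2) = pvEmit d := by
  intro d hd
  have h1 : (pvGroup d).flatMap (fun c => pvCellB c.2.1 c.2.2)
      = (pvGroup d).flatMap (fun c => pvBlock c.2.1 c.2.2) :=
    List.flatMap_congr (fun c _ => pv_cell_eq c.2.1 c.2.2)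
  unfold pvEmit
  rw [h1, ← pv_group_pairs d (pv_K_bounds d hd).1, List.flatMap_map]

theorem pv_B_main (r : Int) :
    ((pvK.flatMap pvGroup).takeWhile (fun c => decide (c.1 ≤ r))).flatMap
        (fun c => pvCellB c.2.1 c.2.2)
      = (pvK.filter (fun d => decide (d ≤ r))).flatMap pvEmit := by
  have hpw : (pvK.flatMap pvGroup).Pairwise (fun a b => a.1 ≤ b.1) := by
    rw [← pv_sortedB_eq]
    exact PySem.List.sorted_pairwise pvCellsB (fun c => c.1)
  rw [pv_takeWhile_filter' r _ hpw, pv_filter_flatMap, List.flatMap_assoc]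
  have step : ∀ d ∈ pvK,
      ((pvGroup d).filter (fun c => decide (c.1 ≤ r))).flatMap (fun c => pvCellB c.2.1 c.2.2)
        = if d ≤ r then pvEmit d else [] := by
    intro d hd
    by_cases hdr : d ≤ r
    · rw [if_pos hdr]
      have : (pvGroup d).filter (fun c => decide (c.1 ≤ r)) = pvGroup d := by
        rw [List.filter_eq_self]
        intro c hc
        simp only [decide_eq_true_eq]
        rw [pv_group_key d c hc]; exact hdr
      rw [this]; exact pv_group_emit d hd
    · rw [if_neg hdr]
      have : (pvGroup d).filter (fun c => decide (c.1 ≤ r)) = [] := by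
        rw [List.filter_eq_nil_iff]
        intro c hc
        simp only [decide_eq_true_eq]
        rw [pv_group_key d c hc]; exact hdr
      rw [this]; rfl
  rw [List.flatMap_congr step, pv_flatMap_ite]

-- ===== VERDICT (by name: the statement is the Claim_ definition above) =====
theorem gen_init_spec : Claim_equal_gen_init := by
  intro radius _
  unfold Spec_gen_init gen_init_alt
  rw [pv_A_chars, pv_sortedB_eq, pv_loopB_eq, pv_header_eq, pv_B_main, pv_A_main]
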